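-- pv_equiv track=rewrite | github.com/dinnerparty718/leetpy | string/Reformat String.py | reformat_string
-- ===== SOURCE A (Python) =====
-- from typing import (
--     List,
-- )
--
-- def reformat_string(str: str, sublen: List[int]) -> str:
--     # write your code here
--     res = ''
--     n = len(sublen)
--     j = 0
--     for i in range(1, n, 2):
--         res = res + str[j + sublen[i-1]: j + sublen[i-1] + sublen[i]] + str[j: j + sublen[i-1]]
--         j += sublen[i-1] + sublen[i]
--
--     if n % 2 == 1:
--         res += str[j: j + sublen[n-1]]
--
--     return res
-- ===== SOURCE B (Python) =====
-- def reformat_string(str, sublen):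
--     offsets = [0]
--     for s in sublen:
--         offsets.append(offsets[-1] + s)
--     chunks = [str[offsets[k]: offsets[k + 1]] for k in range(len(sublen))]
--     for k in range(0, len(sublen) - 1, 2):
--         chunks[k], chunks[k + 1] = chunks[k + 1], chunks[k]
--     return ''.join(chunks)
-- ===== Notes on version B (the rewrite author's own statement) =====
-- stated objective: simpler
-- what changed: B precomputes all chunk boundaries as prefix sums of sublen, slices the string into a chunk list, swaps adjacent chunks in place and joins, instead of A's single loop threading a running offset through inline slice concatenation.
import Mathlib
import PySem

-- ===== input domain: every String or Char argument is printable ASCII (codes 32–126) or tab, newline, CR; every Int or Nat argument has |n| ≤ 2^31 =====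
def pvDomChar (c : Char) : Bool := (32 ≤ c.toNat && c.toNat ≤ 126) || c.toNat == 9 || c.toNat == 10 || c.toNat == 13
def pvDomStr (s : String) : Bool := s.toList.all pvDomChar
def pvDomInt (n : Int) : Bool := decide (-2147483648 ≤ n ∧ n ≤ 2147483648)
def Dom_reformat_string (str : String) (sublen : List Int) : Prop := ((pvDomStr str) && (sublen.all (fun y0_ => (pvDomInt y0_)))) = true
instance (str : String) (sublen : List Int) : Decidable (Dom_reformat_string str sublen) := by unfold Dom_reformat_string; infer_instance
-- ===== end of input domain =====

-- B builds all chunk boundaries up front (prefix sums of sublen), slices the string into a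
-- chunk list, swaps adjacent chunks in place and joins — instead of A's single loop threading
-- a running offset through inline slice concatenation (objective: simpler decomposition).

-- ===== PORT A =====
-- A's loop over range(1, n, 2) with state (res, j); string slices via PySem.List.slice on code points (exact).
def reformat_string (str : String) (sublen : List Int) : String :=
  let s := str.toList
  let n : Int := sublen.length
  let st := (PySem.List.pyRange 1 n 2).foldl
    (fun (st : List Char × Int) i =>
      let a := PySem.List.pyGetD sublen (i - 1) 0
      let b := PySem.List.pyGetD sublen i 0
      (st.1 ++ PySem.List.slice s (some (st.2 + a)) (some (st.2 + a + b))
            ++ PySem.List.slice s (some st.2) (some (st.2 + a)),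
       st.2 + (a + b)))
    ([], 0)
  let res := if PySem.Int.mod n 2 = 1 then
      st.1 ++ PySem.List.slice s (some st.2) (some (st.2 + PySem.List.pyGetD sublen (n - 1) 0))
    else st.1
  String.ofList res

-- ===== PORT B =====
-- Source B: offsets by prefix sums (appending offsets[-1] + x), chunk list by slicing at
-- consecutive offsets, in-place adjacent swaps over range(0, n-1, 2), then join.
def reformat_string_alt (str : String) (sublen : List Int) : String :=
  let s := str.toList
  let offsets := sublen.foldl (fun (acc : List Int) x => acc ++ [PySem.List.pyGetD acc (-1) 0 + x]) [0]
  let chunks := (List.range sublen.length).map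
    (fun (k : Nat) => PySem.List.slice s (some (PySem.List.pyGetD offsets ((k : Int)) 0))
                                 (some (PySem.List.pyGetD offsets ((k : Int) + 1) 0)))
  let chunks2 := (PySem.List.pyRange 0 ((sublen.length : Int) - 1) 2).foldl
    (fun (ch : List (List Char)) k =>
      let a := PySem.List.pyGetD ch k []
      let b := PySem.List.pyGetD ch (k + 1) []
      (ch.set k.toNat b).set (k + 1).toNat a)
    chunks
  String.ofList chunks2.flatten

-- ===== PRECONDITION & SPEC =====
def Spec_reformat_string (str : String) (sublen : List Int) (out : String) : Prop := out = reformat_string_alt str sublen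
instance (str : String) (sublen : List Int) (out : String) : Decidable (Spec_reformat_string str sublen out) := by unfold Spec_reformat_string; infer_instance

-- ===== CLAIM (what is proved, stated in full; the proofs are below) =====
def Claim_equal_reformat_string : Prop := ∀ (str : String) (sublen : List Int), Dom_reformat_string str sublen → Spec_reformat_string str sublen (reformat_string str sublen)

-- ===== LEMMAS AND PROOFS =====


-- The common chunk sequence both programs produce, two swapped chunks at a time from offset j.
def pvPairs (s : List Char) (j : Int) : List Int → List (List Char)
  | [] => []
  | [a] => [PySem.List.slice s (some j) (some (j + a))]
  | a :: b :: rest =>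
      PySem.List.slice s (some (j + a)) (some (j + a + b)) ::
      PySem.List.slice s (some j) (some (j + a)) ::
      pvPairs s (j + a + b) rest

-- B's chunk list before the swaps, from offset j.
def pvPlain (s : List Char) (j : Int) : List Int → List (List Char)
  | [] => []
  | a :: rest => PySem.List.slice s (some j) (some (j + a)) :: pvPlain s (j + a) rest

-- B's offsets list after the leading j.
def pvOffs (j : Int) : List Int → List Int
  | [] => []
  | x :: xs => (j + x) :: pvOffs (j + x) xs

-- Functional form of B's swap loop.
def pvSwap {α : Type} : List α → List α
  | [] => []
  | [c] => [c]
  | c1 :: c2 :: r => c2 :: c1 :: pvSwap r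

-- A's loop step and loop-with-tail, with generalized accumulator and offset.
def pvAone (s : List Char) (lens : List Int) : (List Char × Int) → Int → (List Char × Int) :=
  fun st i =>
    (st.1 ++ PySem.List.slice s (some (st.2 + PySem.List.pyGetD lens (i - 1) 0))
               (some (st.2 + PySem.List.pyGetD lens (i - 1) 0 + PySem.List.pyGetD lens i 0))
          ++ PySem.List.slice s (some st.2) (some (st.2 + PySem.List.pyGetD lens (i - 1) 0)),
     st.2 + (PySem.List.pyGetD lens (i - 1) 0 + PySem.List.pyGetD lens i 0))

def pvAgen (s : List Char) (lens : List Int) (res : List Char) (j : Int) : List Char :=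
  if PySem.Int.mod (lens.length : Int) 2 = 1 then
    ((PySem.List.pyRange 1 (lens.length : Int) 2).foldl (pvAone s lens) (res, j)).1
      ++ PySem.List.slice s (some ((PySem.List.pyRange 1 (lens.length : Int) 2).foldl (pvAone s lens) (res, j)).2)
           (some (((PySem.List.pyRange 1 (lens.length : Int) 2).foldl (pvAone s lens) (res, j)).2
                    + PySem.List.pyGetD lens ((lens.length : Int) - 1) 0))
  else ((PySem.List.pyRange 1 (lens.length : Int) 2).foldl (pvAone s lens) (res, j)).1

-- B's swap step.
def pvBone : List (List Char) → Int → List (List Char) :=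
  fun ch k =>
    (ch.set k.toNat (PySem.List.pyGetD ch (k + 1) [])).set (k + 1).toNat (PySem.List.pyGetD ch k [])

lemma pyGetD_cons_succ {α : Type} (x : α) (l : List α) (i : Int) (d : α) (h : 0 ≤ i) :
    PySem.List.pyGetD (x :: l) (i + 1) d = PySem.List.pyGetD l i d := by
  obtain ⟨n, rfl⟩ := Int.eq_ofNat_of_zero_le h
  have e : ((n : Int) + 1) = ((n + 1 : Nat) : Int) := by push_cast; ring
  rw [e, PySem.List.pyGetD_natCast, PySem.List.pyGetD_natCast]
  rfl

lemma pyGetD_cons_zero {α : Type} (x : α) (l : List α) (d : α) :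
    PySem.List.pyGetD (x :: l) 0 d = x := by
  rw [show (0 : Int) = ((0 : Nat) : Int) from rfl, PySem.List.pyGetD_natCast]
  rfl

lemma pyGetD_cons_one {α : Type} (x y : α) (l : List α) (d : α) :
    PySem.List.pyGetD (x :: y :: l) 1 d = y := by
  rw [show (1 : Int) = ((0 : Nat) : Int) + 1 from rfl, pyGetD_cons_succ _ _ _ _ (by positivity),
      PySem.List.pyGetD_natCast]
  rfl

lemma pyGetD_cons2 {α : Type} (x y : α) (l : List α) (i : Int) (d : α) (h : 0 ≤ i) :
    PySem.List.pyGetD (x :: y :: l) (i + 2) d = PySem.List.pyGetD l i d := by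
  rw [show i + 2 = (i + 1) + 1 from by ring, pyGetD_cons_succ _ _ _ _ (by omega),
      pyGetD_cons_succ _ _ _ _ h]

lemma pyGetD_last (acc : List Int) (j : Int) :
    PySem.List.pyGetD (acc ++ [j]) (-1) 0 = j := by
  simp [PySem.List.pyGetD, PySem.List.pyGet?, PySem.List.pyIdx?]

lemma pyRange_two_nil (a b : Int) (h : b ≤ a) : PySem.List.pyRange a b 2 = [] := by
  rw [PySem.List.pyRange_of_pos a b (by norm_num)]
  simp [show ¬ a < b by omega]

lemma pyRange_two_cons (a b : Int) (h : a < b) :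
    PySem.List.pyRange a b 2 = a :: PySem.List.pyRange (a + 2) b 2 := by
  rw [PySem.List.pyRange_of_pos a b (by norm_num), PySem.List.pyRange_of_pos (a+2) b (by norm_num)]
  by_cases h2 : a + 2 < b
  · have e : ((b - a + 2 - 1) / 2).toNat = ((b - (a+2) + 2 - 1) / 2).toNat + 1 := by omega
    simp only [if_pos h, if_pos h2, e, List.range_succ_eq_map, List.map_cons, List.map_map]
    congr 1
    · norm_num
    · refine List.map_congr_left ?_
      intro k _; simp [Function.comp]; ring
  · have e : ((b - a + 2 - 1) / 2).toNat = 1 := by omega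
    simp [if_pos h, if_neg h2, e, List.range_succ]

lemma pyRange_two_shift (a b : Int) :
    PySem.List.pyRange (a + 2) b 2 = (PySem.List.pyRange a (b - 2) 2).map (· + 2) := by
  rw [PySem.List.pyRange_of_pos (a+2) b (by norm_num), PySem.List.pyRange_of_pos a (b-2) (by norm_num)]
  by_cases h : a < b - 2
  · have e : (b - (a+2) + 2 - 1) / 2 = (b - 2 - a + 2 - 1) / 2 := by omega
    simp only [if_pos (show a + 2 < b by omega), if_pos h, e, List.map_map]
    refine List.map_congr_left ?_
    intro k _; simp [Function.comp]; ring
  · simp [show ¬ a + 2 < b by omega, if_neg h]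

lemma mod_two_add_two (m : Int) : PySem.Int.mod (m + 2) 2 = PySem.Int.mod m 2 := by
  rw [PySem.Int.mod_eq_emod_of_pos (by norm_num : (0:Int) < 2),
      PySem.Int.mod_eq_emod_of_pos (by norm_num : (0:Int) < 2)]
  omega

lemma pvSwap_pvPlain (s : List Char) : ∀ (j : Int) (lens : List Int),
    pvSwap (pvPlain s j lens) = pvPairs s j lens := by
  intro j lens
  induction j, lens using pvPairs.induct with
  | case1 j => rfl
  | case2 j a => rfl
  | case3 j a b rest ih =>
      show pvSwap (_ :: _ :: pvPlain s (j + a + b) rest) = _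
      rw [pvSwap, ih]
      rfl

lemma pvAone_shift (s : List Char) (a b : Int) (rest : List Int) (st : List Char × Int)
    (i : Int) (hi : 1 ≤ i) :
    pvAone s (a :: b :: rest) st (i + 2) = pvAone s rest st i := by
  unfold pvAone
  rw [show i + 2 - 1 = (i - 1) + 2 from by ring]
  rw [pyGetD_cons2 _ _ _ _ _ (by omega), pyGetD_cons2 _ _ _ _ _ (by omega)]

lemma pvAone_first (s : List Char) (a b : Int) (rest : List Int) (res : List Char) (j : Int) :
    pvAone s (a :: b :: rest) (res, j) 1
      = (res ++ PySem.List.slice s (some (j + a)) (some (j + a + b))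
             ++ PySem.List.slice s (some j) (some (j + a)), j + (a + b)) := by
  unfold pvAone
  rw [show (1 : Int) - 1 = 0 from by ring, pyGetD_cons_zero, pyGetD_cons_one]

lemma pvAgen_eq (s : List Char) : ∀ (j : Int) (lens : List Int), ∀ (res : List Char),
    pvAgen s lens res j = res ++ (pvPairs s j lens).flatten := by
  intro j lens
  induction j, lens using pvPairs.induct with
  | case1 j =>
      intro res
      unfold pvAgen
      norm_num [pyRange_two_nil 1 0 (by norm_num), pvPairs,
        show PySem.Int.mod 0 2 ≠ 1 from by decide]
  | case2 j a =>
      intro res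
      unfold pvAgen
      norm_num [pyRange_two_nil 1 1 (by norm_num), pvPairs,
        show PySem.Int.mod 1 2 = 1 from by decide, pyGetD_cons_zero]
  | case3 j a b rest ih =>
      intro res
      unfold pvAgen
      have hn2 : (((a :: b :: rest).length : Nat) : Int) = (rest.length : Int) + 2 := by
        simp only [List.length_cons]; push_cast; ring
      rw [hn2, pyRange_two_cons 1 ((rest.length : Int) + 2) (by omega)]
      rw [show (1 : Int) + 2 = 3 from by norm_num, show (3 : Int) = 1 + 2 from by norm_num,
          pyRange_two_shift 1 ((rest.length : Int) + 2)]
      rw [List.foldl_cons, List.foldl_map]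
      rw [PySem.List.foldl_congr_mem _ _ (pvAone s rest) _ (by
        intro st i hi
        have h1 : 1 ≤ i := ((PySem.List.mem_pyRange_iff_of_pos (by norm_num) i).mp hi).1
        exact pvAone_shift s a b rest st i h1)]
      rw [pvAone_first]
      rw [show (rest.length : Int) + 2 - 2 = (rest.length : Int) from by ring]
      rw [mod_two_add_two]
      have hih := ih (res ++ PySem.List.slice s (some (j + a)) (some (j + a + b))
                 ++ PySem.List.slice s (some j) (some (j + a)))
      unfold pvAgen at hih
      rw [show j + (a + b) = j + a + b from by ring]
      by_cases hodd : PySem.Int.mod (rest.length : Int) 2 = 1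
      · have hpos : 1 ≤ (rest.length : Int) := by
          rcases rest with _ | ⟨x, xs⟩
          · exfalso; revert hodd; decide
          · simp
        have htail : PySem.List.pyGetD (a :: b :: rest) ((rest.length : Int) + 2 - 1) 0
            = PySem.List.pyGetD rest ((rest.length : Int) - 1) 0 := by
          rw [show (rest.length : Int) + 2 - 1 = ((rest.length : Int) - 1) + 2 from by ring,
              pyGetD_cons2 _ _ _ _ _ (by omega)]
        rw [if_pos hodd, htail]
        rw [if_pos hodd] at hih
        rw [hih, pvPairs]
        simp
      · rw [if_neg hodd]
        rw [if_neg hodd] at hih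
        rw [hih, pvPairs]
        simp

-- B: the offsets fold is a prefix-sum scan.
lemma offs_foldl : ∀ (xs : List Int) (acc : List Int) (j : Int),
    xs.foldl (fun (acc : List Int) x => acc ++ [PySem.List.pyGetD acc (-1) 0 + x]) (acc ++ [j])
    = acc ++ j :: pvOffs j xs := by
  intro xs
  induction xs with
  | nil => intro acc j; simp [pvOffs]
  | cons x xs ih =>
      intro acc j
      rw [List.foldl_cons, pyGetD_last, ih (acc ++ [j]) (j + x)]
      simp [pvOffs]

-- B: slicing at consecutive offsets yields the plain chunk list.
lemma chunks_eq (s : List Char) : ∀ (lens : List Int) (j : Int),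
    (List.range lens.length).map
      (fun (k : Nat) => PySem.List.slice s (some (PySem.List.pyGetD (j :: pvOffs j lens) ((k : Int)) 0))
                                   (some (PySem.List.pyGetD (j :: pvOffs j lens) ((k : Int) + 1) 0)))
    = pvPlain s j lens := by
  intro lens
  induction lens with
  | nil => intro j; simp [pvPlain]
  | cons x xs ih =>
      intro j
      rw [List.length_cons, List.range_succ_eq_map, List.map_cons, List.map_map]
      have hhead : PySem.List.slice s (some (PySem.List.pyGetD (j :: pvOffs j (x :: xs)) (((0 : Nat) : Int)) 0))
          (some (PySem.List.pyGetD (j :: pvOffs j (x :: xs)) (((0 : Nat) : Int) + 1) 0))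
          = PySem.List.slice s (some j) (some (j + x)) := by
        rw [show (((0 : Nat) : Int)) = 0 from rfl, show ((0 : Int) + 1) = 1 from by ring,
            pyGetD_cons_zero, show pvOffs j (x :: xs) = (j + x) :: pvOffs (j + x) xs from rfl,
            pyGetD_cons_one]
      rw [hhead]
      have htail : ((fun (k : Nat) => PySem.List.slice s (some (PySem.List.pyGetD (j :: pvOffs j (x :: xs)) ((k : Int)) 0))
              (some (PySem.List.pyGetD (j :: pvOffs j (x :: xs)) ((k : Int) + 1) 0))) ∘ Nat.succ)
          = (fun (k : Nat) => PySem.List.slice s (some (PySem.List.pyGetD ((j + x) :: pvOffs (j + x) xs) ((k : Int)) 0))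
              (some (PySem.List.pyGetD ((j + x) :: pvOffs (j + x) xs) ((k : Int) + 1) 0))) := by
        funext k
        simp only [Function.comp_apply]
        have e1 : ((Nat.succ k : Nat) : Int) = (k : Int) + 1 := by push_cast; ring
        simp only [e1, show pvOffs j (x :: xs) = (j + x) :: pvOffs (j + x) xs from rfl]
        rw [pyGetD_cons_succ _ _ _ _ (by positivity),
            show (k : Int) + 1 + 1 = ((k : Int) + 1) + 1 from rfl,
            pyGetD_cons_succ _ _ _ _ (by positivity)]
      rw [htail, ih (j + x)]
      rfl

lemma pvPlain_length (s : List Char) : ∀ (lens : List Int) (j : Int),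
    (pvPlain s j lens).length = lens.length := by
  intro lens
  induction lens with
  | nil => intro j; rfl
  | cons x xs ih => intro j; simp [pvPlain, ih]

lemma pvBone_shift (x y : List Char) (ch : List (List Char)) (k : Int) (hk : 0 ≤ k) :
    pvBone (x :: y :: ch) (k + 2) = x :: y :: pvBone ch k := by
  unfold pvBone
  rw [show k + 2 + 1 = (k + 1) + 2 from by ring]
  rw [pyGetD_cons2 _ _ _ _ _ (by omega), pyGetD_cons2 _ _ _ _ _ (by omega)]
  rw [show (k + 2).toNat = k.toNat + 1 + 1 from by omega,
      show ((k + 1) + 2).toNat = (k + 1).toNat + 1 + 1 from by omega]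
  rw [List.set_cons_succ, List.set_cons_succ, List.set_cons_succ, List.set_cons_succ]

lemma foldl_pvBone_cons2 (x y : List Char) : ∀ (L : List Int), (∀ k ∈ L, 0 ≤ k) →
    ∀ (ch : List (List Char)),
    L.foldl (fun ch k => pvBone ch (k + 2)) (x :: y :: ch)
    = x :: y :: L.foldl pvBone ch := by
  intro L
  induction L with
  | nil => intro _ ch; rfl
  | cons k L ih =>
      intro hall ch
      rw [List.foldl_cons, List.foldl_cons, pvBone_shift x y ch k (hall k (by simp))]
      exact ih (fun k hk => hall k (by simp [hk])) (pvBone ch k)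

lemma pvBone_first (c1 c2 : List Char) (r : List (List Char)) :
    pvBone (c1 :: c2 :: r) 0 = c2 :: c1 :: r := by
  unfold pvBone
  rw [show (0 : Int) + 1 = 1 from by ring, pyGetD_cons_zero, pyGetD_cons_one]
  rfl

lemma swap_all : ∀ (cs : List (List Char)),
    (PySem.List.pyRange 0 ((cs.length : Int) - 1) 2).foldl pvBone cs = pvSwap cs := by
  intro cs
  induction cs using pvSwap.induct with
  | case1 => rfl
  | case2 c =>
      rw [show ((([c] : List (List Char)).length : Int) - 1) = 0 from by simp,
          pyRange_two_nil 0 0 (by norm_num)]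
      rfl
  | case3 c1 c2 r ih =>
      have hn : (((c1 :: c2 :: r).length : Int) - 1) = (r.length : Int) + 1 := by
        simp only [List.length_cons]; push_cast; ring
      rw [hn, pyRange_two_cons 0 ((r.length : Int) + 1) (by omega)]
      rw [pyRange_two_shift 0 ((r.length : Int) + 1)]
      rw [List.foldl_cons, List.foldl_map, pvBone_first]
      rw [show (r.length : Int) + 1 - 2 = (r.length : Int) - 1 from by ring]
      rw [foldl_pvBone_cons2 c2 c1 _ (by
        intro k hk
        exact ((PySem.List.mem_pyRange_iff_of_pos (by norm_num) k).mp hk).1) r]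
      rw [ih, pvSwap]

lemma reformat_A_eq (str : String) (sublen : List Int) :
    reformat_string str sublen = String.ofList (pvAgen str.toList sublen [] 0) := rfl

lemma reformat_B_eq (str : String) (sublen : List Int) :
    reformat_string_alt str sublen = String.ofList (pvPairs str.toList 0 sublen).flatten := by
  simp only [reformat_string_alt]
  rw [show ([0] : List Int) = [] ++ [0] from rfl, offs_foldl sublen [] 0]
  rw [List.nil_append, chunks_eq str.toList sublen 0]
  rw [show (fun (ch : List (List Char)) k =>
      (ch.set k.toNat (PySem.List.pyGetD ch (k + 1) [])).set (k + 1).toNat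
        (PySem.List.pyGetD ch k [])) = pvBone from rfl]
  rw [show ((sublen.length : Int) - 1) = (((pvPlain str.toList 0 sublen).length : Int) - 1) from by
    rw [pvPlain_length]]
  rw [swap_all, pvSwap_pvPlain]

-- ===== VERDICT (by name: the statement is the Claim_ definition above) =====
theorem reformat_string_spec : Claim_equal_reformat_string := by
  intro str sublen _
  unfold Spec_reformat_string
  rw [reformat_A_eq, pvAgen_eq str.toList 0 sublen [], List.nil_append, reformat_B_eq]
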